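-- pv_equiv track=rewrite | github.com/diofeher/algorithms | order-buckets.py | dp_o_n
-- ===== SOURCE A (Python) =====
-- def dp_o_n(inp):
--     lst = list(inp)
--     N = len(lst)
--     B = lst.count("B")
--
--     # 2 - Return invalid if there is no available space to order the buckets -> O(1)
--     if B * 2 - 1 > N:
--         return -1
--
--     # Calculate first sliding window -> O(B)
--     last_in_place = 0
--     last_sliding_window_buckets = 0
--     size_sliding_window = B * 2 - 1
--     cur_buckets = 0
--     for i in range(size_sliding_window):
--         if lst[i] == "B":
--             last_sliding_window_buckets += 1
--             if i % 2 == 0: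
--                 last_in_place += 1
--
--     maximum_in_place = last_in_place
--     for i in range(1, N):
--         cur_buckets = last_sliding_window_buckets
--         # All the buckets in place on the last window are out of place,
--         # but the buckets out of place, are now in place
--         cur_in_place = cur_buckets - last_in_place
--         end_sliding_window = i + size_sliding_window
--
--         if end_sliding_window > N:
--             # We're out of bounds here
--             break
--
--         # Now we check the previous item out the sliding window
--         if lst[i - 1] == "B":
--             cur_buckets -= 1
--         # And we check the LAST item on the sliding window
--         if lst[end_sliding_window - 1] == "B":
--             cur_buckets += 1
--             cur_in_place += 1
--
--         last_sliding_window_buckets = cur_buckets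
--         last_in_place = cur_in_place
--
--         maximum_in_place = max(maximum_in_place, cur_in_place)
--
--     return B - maximum_in_place
-- ===== SOURCE B (Python) =====
-- def dp_o_n(inp):
--     n = len(inp)
--     b = inp.count("B")
--     if b * 2 - 1 > n:
--         return -1
--     if b == 0:
--         return 0
--     s = b * 2 - 1
--     best = 0
--     for i in range(n - s + 1):
--         # count buckets already in place for the window starting at i
--         in_place = sum(1 for j in range(i, i + s)
--                        if inp[j] == "B" and j % 2 == i % 2)
--         if in_place > best:
--             best = in_place
--     return b - best
-- ===== Notes on version B (the rewrite author's own statement) =====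
-- stated objective: alternative
-- what changed: A maintains a sliding-window state (window bucket count, in-place count, running max) updated incrementally with a parity-flip trick; B independently recounts, for each window start, the buckets already sitting at in-place parity positions and takes the max - no carried state, no flip recurrence.
import Mathlib
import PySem

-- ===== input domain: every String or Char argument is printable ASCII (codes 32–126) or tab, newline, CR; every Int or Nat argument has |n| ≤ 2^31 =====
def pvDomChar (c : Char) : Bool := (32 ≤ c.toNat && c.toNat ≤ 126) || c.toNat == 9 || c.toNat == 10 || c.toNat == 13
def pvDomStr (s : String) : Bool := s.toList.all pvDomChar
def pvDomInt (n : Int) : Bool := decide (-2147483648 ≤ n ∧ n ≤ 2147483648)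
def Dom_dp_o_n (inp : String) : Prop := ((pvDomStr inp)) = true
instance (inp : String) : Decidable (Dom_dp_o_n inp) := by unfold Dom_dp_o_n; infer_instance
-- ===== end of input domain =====

-- B replaces A's stateful sliding-window recurrence by a direct per-window recount of
-- in-place buckets (objective: alternative/simpler decomposition); no speed claim.

-- ===== PORT A =====
-- the `for i in range(1, N)` loop of A, with its break; state = (lswb, lip, maxip)
def dpLoopA (lst : List Char) (N s i lswb lip maxip : Int) : Int :=
  if _h : i < N then
    let curB := lswb
    let curIP := curB - lip
    let endw := i + s
    if endw > N then maxip
    else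
      let curB := if PySem.List.pyGetD lst (i - 1) ' ' = 'B' then curB - 1 else curB
      let curB := if PySem.List.pyGetD lst (endw - 1) ' ' = 'B' then curB + 1 else curB
      let curIP := if PySem.List.pyGetD lst (endw - 1) ' ' = 'B' then curIP + 1 else curIP
      dpLoopA lst N s (i + 1) curB curIP (max maxip curIP)
  else maxip
termination_by (N - i).toNat
decreasing_by omega

def dp_o_n (inp : String) : Int :=
  let lst := inp.toList
  let N : Int := lst.length
  let B : Int := lst.count 'B'
  if B * 2 - 1 > N then -1
  else
    let size := B * 2 - 1
    let fw := (PySem.List.pyRange 0 size 1).foldl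
      (fun (st : Int × Int) i =>
        if PySem.List.pyGetD lst i ' ' = 'B' then
          (st.1 + 1, if PySem.Int.mod i 2 = 0 then st.2 + 1 else st.2)
        else st) (0, 0)
    B - dpLoopA lst N size 1 fw.1 fw.2 fw.2

-- ===== PORT B =====
def dp_o_n_alt (inp : String) : Int :=
  let lst := inp.toList
  let n : Int := lst.length
  let b : Int := lst.count 'B'
  if b * 2 - 1 > n then -1
  else if b = 0 then 0
  else
    let s := b * 2 - 1
    let best := (PySem.List.pyRange 0 (n - s + 1) 1).foldl
      (fun best i =>
        let ip := (PySem.List.pyRange i (i + s) 1).foldl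
          (fun acc j =>
            if PySem.List.pyGetD lst j ' ' = 'B' ∧ PySem.Int.mod j 2 = PySem.Int.mod i 2
            then acc + 1 else acc) 0
        if ip > best then ip else best) 0
    b - best

-- ===== PRECONDITION & SPEC =====
def Spec_dp_o_n (inp : String) (out : Int) : Prop := out = dp_o_n_alt inp
instance (inp : String) (out : Int) : Decidable (Spec_dp_o_n inp out) := by unfold Spec_dp_o_n; infer_instance

-- ===== CLAIM (what is proved, stated in full; the proofs are below) =====
def Claim_equal_dp_o_n : Prop := ∀ (inp : String), Dom_dp_o_n inp → Spec_dp_o_n inp (dp_o_n inp)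

-- ===== LEMMAS AND PROOFS =====

-- proof-side reference counts: window [a, a+s), buckets in it (wcnt) and
-- in-place buckets (index parity equal to the window start's, ipcnt)
def inb (l : List Char) (j : Nat) : Bool := l.getD j ' ' == 'B'
def wcnt (l : List Char) (a s : Nat) : Nat := (List.range' a s).countP (fun j => inb l j)
def ipcnt (l : List Char) (a s : Nat) : Nat :=
  (List.range' a s).countP (fun j => inb l j && (j % 2 == a % 2))

def mrun (l : List Char) (s : Nat) : Nat → Nat → Int → Int
  | _, 0, M => M
  | a, r+1, M => mrun l s (a+1) r (max M (ipcnt l a s))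

theorem countP_split {α : Type} (L : List α) (p q : α → Bool) :
    L.countP p = L.countP (fun x => p x && q x) + L.countP (fun x => p x && !q x) := by
  induction L with
  | nil => simp
  | cons x xs ih =>
    simp only [List.countP_cons, ih]
    cases hp : p x <;> cases hq : q x <;> simp <;> omega

theorem pyGetD_natCast' (l : List Char) (m : Nat) :
    PySem.List.pyGetD l ((m : Nat) : Int) ' ' = l.getD m ' ' := by
  simp [PySem.List.pyGetD_natCast]

theorem mod2_natCast (m : Nat) : PySem.Int.mod ((m : Nat) : Int) 2 = ((m % 2 : Nat) : Int) := by
  rw [PySem.Int.mod_eq_emod_of_pos (by norm_num)]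
  omega

theorem wcnt_step (l : List Char) (a s : Nat) (ha : 1 ≤ a) (hs : 1 ≤ s) :
    wcnt l (a-1) s + (if inb l (a-1+s) then 1 else 0)
      = (if inb l (a-1) then 1 else 0) + wcnt l a s := by
  obtain ⟨t, rfl⟩ : ∃ t, s = t + 1 := ⟨s - 1, by omega⟩
  have h1 : wcnt l (a-1) (t+1) = (if inb l (a-1) then 1 else 0) + wcnt l a t := by
    unfold wcnt
    rw [List.range'_succ, List.countP_cons]
    have : a - 1 + 1 = a := by omega
    rw [this]; cases h : inb l (a-1) <;> simp [h] <;> omega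
  have h2 : wcnt l a (t+1) = wcnt l a t + (if inb l (a+t) then 1 else 0) := by
    unfold wcnt
    rw [List.range'_concat, List.countP_append]
    cases h : inb l (a+t) <;> simp [h]
  have ht : a - 1 + (t+1) = a + t := by omega
  rw [h1, h2, ht]
  omega

theorem ipcnt_step (l : List Char) (a s b : Nat) (ha : 1 ≤ a) (hb : 1 ≤ b) (hs : s = 2*b - 1) :
    ipcnt l a s + ipcnt l (a-1) s = wcnt l (a-1) s + (if inb l (a-1+s) then 1 else 0) := by
  obtain ⟨t, rfl⟩ : ∃ t, s = t + 1 := ⟨s - 1, by omega⟩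
  have ht2 : t % 2 = 0 := by omega
  have hne : (a-1) % 2 ≠ a % 2 := by omega
  have hpar : (fun j => inb l j && !(j % 2 == (a-1) % 2))
      = (fun j => inb l j && (j % 2 == a % 2)) := by
    funext j
    rcases Nat.mod_two_eq_zero_or_one j with h | h <;>
      rcases Nat.mod_two_eq_zero_or_one a with h' | h' <;>
        rcases Nat.mod_two_eq_zero_or_one (a-1) with h'' | h'' <;>
          first
            | (exfalso; omega)
            | simp [h, h', h'']
  have P1 : ipcnt l a (t+1)
      = (List.range' a t).countP (fun j => inb l j && (j % 2 == a % 2))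
        + (if inb l (a+t) then 1 else 0) := by
    unfold ipcnt
    rw [List.range'_concat, List.countP_append]
    have hp : (a+t) % 2 = a % 2 := by omega
    cases h : inb l (a+t) <;> simp [h, hp]
  have P2 : wcnt l (a-1) (t+1)
      = ipcnt l (a-1) (t+1)
        + (List.range' (a-1) (t+1)).countP (fun j => inb l j && !(j % 2 == (a-1) % 2)) := by
    unfold wcnt ipcnt
    exact countP_split _ _ _
  have P3 : (List.range' (a-1) (t+1)).countP (fun j => inb l j && !(j % 2 == (a-1) % 2))
      = (List.range' a t).countP (fun j => inb l j && (j % 2 == a % 2)) := by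
    rw [List.range'_succ, List.countP_cons]
    have e1 : a - 1 + 1 = a := by omega
    rw [e1, hpar]
    simp [hne]
  have e3 : a - 1 + (t + 1) = a + t := by omega
  rw [P1, P2, P3, e3]
  omega

theorem dpLoopA_eq (l : List Char) (b s n : Nat) (hb : 1 ≤ b) (hs : s = 2*b - 1)
    (hn : n = l.length) (hsn : s ≤ n) :
    ∀ (r a : Nat) (M : Int), 1 ≤ a → a + r = n - s + 1 →
      dpLoopA l (n : Int) (s : Int) (a : Int)
        ((wcnt l (a-1) s : Nat) : Int) ((ipcnt l (a-1) s : Nat) : Int) M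
      = mrun l s a r M := by
  intro r
  have hs1 : 1 ≤ s := by omega
  induction r with
  | zero =>
    intro a M ha har
    rw [dpLoopA]
    by_cases hin : (a : Int) < (n : Int)
    · rw [dif_pos hin]
      have hend : ((a : Int) + (s : Int) > (n : Int)) := by omega
      simp only [hend, if_true]
      rfl
    · rw [dif_neg hin]
      rfl
  | succ r ih =>
    intro a M ha har
    have haleft : a + s ≤ n := by omega
    have hin : (a : Int) < (n : Int) := by omega
    rw [dpLoopA, dif_pos hin]
    have hend : ¬((a : Int) + (s : Int) > (n : Int)) := by omega
    simp only [hend, if_false]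
    have i1 : (a : Int) - 1 = ((a - 1 : Nat) : Int) := by omega
    have i2 : (a : Int) + (s : Int) - 1 = ((a - 1 + s : Nat) : Int) := by omega
    rw [i1, i2, pyGetD_natCast', pyGetD_natCast']
    have hw := wcnt_step l a s ha hs1
    have hip := ipcnt_step l a s b ha hb hs
    have hrw : ((a : Int) + 1) = ((a + 1 : Nat) : Int) := by omega
    by_cases h1 : l.getD (a-1) ' ' = 'B' <;> by_cases h2 : l.getD (a-1+s) ' ' = 'B' <;>
      simp only [h1, h2, if_true, if_false, if_pos, if_neg, not_false_iff] <;>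
      simp only [inb, h1, h2, beq_iff_eq, if_true, if_false] at hw hip
    all_goals
      rw [hrw]
      have e3 : a + 1 - 1 = a := by omega
      have key := ih (a+1) (max M ((ipcnt l a s : Nat) : Int)) (by omega) (by omega)
      rw [e3] at key
      conv_rhs => rw [mrun]
      rw [← key]
      congr 1 <;> omega

theorem dpLoopA_allzero (l : List Char) (N s : Int)
    (h : ∀ j : Int, PySem.List.pyGetD l j ' ' ≠ 'B') :
    ∀ (k : Nat) (i : Int), (N - i).toNat = k → dpLoopA l N s i 0 0 0 = 0 := by
  intro k
  induction k with
  | zero =>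
    intro i hk
    rw [dpLoopA]
    have hni : ¬ i < N := by omega
    rw [dif_neg hni]
  | succ k ih =>
    intro i hk
    rw [dpLoopA]
    by_cases hin : i < N
    · rw [dif_pos hin]
      by_cases hend : i + s > N
      · simp only [hend, if_true]
      · simp only [hend, if_false, h (i-1), h (i+s-1), if_neg, not_false_iff]
        have key := ih (i+1) (by omega)
        simpa using key
    · rw [dif_neg hin]

theorem fw_eq (l : List Char) (m : Nat) :
    (PySem.List.pyRange 0 ((m : Nat) : Int) 1).foldl
      (fun (st : Int × Int) i =>
        if PySem.List.pyGetD l i ' ' = 'B' then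
          (st.1 + 1, if PySem.Int.mod i 2 = 0 then st.2 + 1 else st.2)
        else st) (0, 0)
    = (((wcnt l 0 m : Nat) : Int), ((ipcnt l 0 m : Nat) : Int)) := by
  induction m with
  | zero =>
    rw [PySem.List.pyRange_one_eq_nil (by omega)]
    simp [wcnt, ipcnt]
  | succ m ih =>
    have hc : ((m + 1 : Nat) : Int) = ((m : Nat) : Int) + 1 := by omega
    rw [hc, PySem.List.pyRange_one_succ_right (by omega), List.foldl_append, ih]
    simp only [List.foldl_cons, List.foldl_nil]
    have hw : wcnt l 0 (m+1) = wcnt l 0 m + (if inb l m then 1 else 0) := by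
      unfold wcnt
      rw [List.range'_concat, List.countP_append]
      cases h : inb l m <;> simp [h]
    have hip : ipcnt l 0 (m+1) = ipcnt l 0 m + (if inb l m && (m % 2 == 0) then 1 else 0) := by
      unfold ipcnt
      rw [List.range'_concat, List.countP_append]
      cases h : (inb l m && (m % 2 == 0)) <;> simp_all
    rw [pyGetD_natCast', mod2_natCast]
    by_cases h1 : l.getD m ' ' = 'B' <;> by_cases h2 : m % 2 = 0 <;>
      simp only [h1, h2, if_true, if_false, if_pos, if_neg, not_false_iff] <;>
      simp only [inb, beq_iff_eq, h1, h2, Bool.and_true, Bool.and_false, if_true, if_false,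
        Nat.cast_ofNat, decide_true, decide_false, Bool.true_and, Bool.false_and] at hw hip <;>
      refine Prod.ext ?_ ?_ <;> simp_all <;> omega

theorem inner_eq (l : List Char) (s a : Nat) :
    (PySem.List.pyRange ((a : Nat) : Int) (((a : Nat) : Int) + ((s : Nat) : Int)) 1).foldl
      (fun acc j =>
        if PySem.List.pyGetD l j ' ' = 'B' ∧ PySem.Int.mod j 2 = PySem.Int.mod ((a : Nat) : Int) 2
        then acc + 1 else acc) 0
    = ((ipcnt l a s : Nat) : Int) := by
  induction s with
  | zero =>
    rw [PySem.List.pyRange_one_eq_nil (by omega)]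
    simp [ipcnt]
  | succ m ih =>
    have hc : ((a : Nat) : Int) + ((m + 1 : Nat) : Int) = (((a : Nat) : Int) + ((m : Nat) : Int)) + 1 := by omega
    rw [hc, PySem.List.pyRange_one_succ_right (by omega), List.foldl_append, ih]
    simp only [List.foldl_cons, List.foldl_nil]
    clear ih
    have hip : ((ipcnt l a (m+1) : Nat) : Int)
        = ((ipcnt l a m : Nat) : Int)
          + (if (l.getD (a+m) ' ' = 'B' ∧ (a+m) % 2 = a % 2) then 1 else 0) := by
      unfold ipcnt
      rw [List.range'_concat, List.countP_append]
      by_cases h1 : l.getD (a+m) ' ' = 'B' <;> by_cases h2 : (a+m) % 2 = a % 2 <;>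
        simp [inb, h1, h2]
    have hcc : ((a : Nat) : Int) + ((m : Nat) : Int) = ((a + m : Nat) : Int) := by omega
    rw [hcc, pyGetD_natCast', mod2_natCast, mod2_natCast, hip]
    by_cases h1 : l.getD (a+m) ' ' = 'B' <;> by_cases h2 : (a+m) % 2 = a % 2 <;>
      simp only [h1, h2, Nat.cast_inj, true_and, and_true, false_and, and_false,
        if_true, if_false, iff_true, and_self] <;>
      simp

theorem outer_eq (l : List Char) (s : Nat) :
    ∀ (r a : Nat) (M : Int),
      (PySem.List.pyRange ((a : Nat) : Int) (((a : Nat) : Int) + ((r : Nat) : Int)) 1).foldl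
        (fun best i =>
          if ((PySem.List.pyRange i (i + ((s : Nat) : Int)) 1).foldl
            (fun acc j =>
              if PySem.List.pyGetD l j ' ' = 'B' ∧ PySem.Int.mod j 2 = PySem.Int.mod i 2
              then acc + 1 else acc) 0) > best
          then ((PySem.List.pyRange i (i + ((s : Nat) : Int)) 1).foldl
            (fun acc j =>
              if PySem.List.pyGetD l j ' ' = 'B' ∧ PySem.Int.mod j 2 = PySem.Int.mod i 2
              then acc + 1 else acc) 0) else best) M
      = mrun l s a r M := by
  intro r
  induction r with
  | zero =>
    intro a M
    rw [PySem.List.pyRange_one_eq_nil (by omega)]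
    simp [mrun]
  | succ r ih =>
    intro a M
    rw [PySem.List.pyRange_one_cons (by omega)]
    simp only [List.foldl_cons]
    rw [inner_eq l s a]
    have hmax : (if ((ipcnt l a s : Nat) : Int) > M then ((ipcnt l a s : Nat) : Int) else M)
        = max M ((ipcnt l a s : Nat) : Int) := by
      rw [max_def]; split_ifs <;> omega
    rw [hmax]
    have h1 : ((a : Nat) : Int) + 1 = ((a + 1 : Nat) : Int) := by omega
    have h2 : ((a : Nat) : Int) + ((r + 1 : Nat) : Int) = ((a + 1 : Nat) : Int) + ((r : Nat) : Int) := by omega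
    rw [h1, h2, ih (a+1) (max M ((ipcnt l a s : Nat) : Int))]
    rfl

theorem main_eq (inp : String) : dp_o_n inp = dp_o_n_alt inp := by
  unfold dp_o_n dp_o_n_alt
  simp only []
  set l := inp.toList with hl
  by_cases hg : ((l.count 'B' : Nat) : Int) * 2 - 1 > ((l.length : Nat) : Int)
  · simp [hg]
  · rw [if_neg hg, if_neg hg]
    by_cases hb0 : l.count 'B' = 0
    · -- no bucket at all: both sides are 0
      have hnoB : ∀ j : Int, PySem.List.pyGetD l j ' ' ≠ 'B' := by
        intro j
        have hmem : 'B' ∉ l := by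
          rw [← List.count_eq_zero]; exact hb0
        by_cases hr : PySem.Raise.InRange l.length j
        · intro hEq
          exact hmem (hEq ▸ PySem.List.pyGetD_mem l ' ' hr)
        · have hnone : PySem.List.pyGet? l j = none := by
            rw [PySem.List.pyGet?_eq_none_iff]; exact hr
          simp [PySem.List.pyGetD, hnone]
      rw [hb0]
      have hrange : PySem.List.pyRange 0 ((((0:Nat) : Int)) * 2 - 1) 1 = [] :=
        PySem.List.pyRange_one_eq_nil (by norm_num)
      rw [hrange]
      simp only [List.foldl_nil]
      rw [dpLoopA_allzero l ((l.length : Nat) : Int) ((((0:Nat) : Int)) * 2 - 1) hnoB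
        ((((l.length : Nat) : Int)) - 1).toNat 1 rfl]
      norm_num
    · -- b ≥ 1
      have hb1 : 1 ≤ l.count 'B' := by omega
      rw [if_neg (by exact_mod_cast hb0)]
      set b := l.count 'B' with hbdef
      set n := l.length with hndef
      have hsn : 2*b - 1 ≤ n := by omega
      have hsz : ((b : Nat) : Int) * 2 - 1 = ((2*b - 1 : Nat) : Int) := by omega
      rw [hsz]
      rw [fw_eq l (2*b-1)]
      have hA := dpLoopA_eq l b (2*b-1) n hb1 rfl hndef hsn (n - (2*b-1)) 1
        ((ipcnt l 0 (2*b-1) : Nat) : Int) (by omega) (by omega)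
      simp only [Nat.sub_self] at hA  -- (1-1) = 0
      rw [show ((1:Nat) : Int) = (1 : Int) from rfl] at hA
      rw [hA]
      have hBnd : ((n : Nat) : Int) - ((2*b-1 : Nat) : Int) + 1
          = (((0:Nat) : Int)) + ((n - (2*b-1) + 1 : Nat) : Int) := by omega
      rw [hBnd]
      have hO := outer_eq l (2*b-1) (n - (2*b-1) + 1) 0 0
      norm_num at hO ⊢
      rw [hO]
      have : mrun l (2*b-1) 0 (n - (2*b-1) + 1) 0
          = mrun l (2*b-1) 1 (n - (2*b-1)) (max 0 ((ipcnt l 0 (2*b-1) : Nat) : Int)) := rfl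
      rw [this, max_eq_right (by positivity)]

-- ===== VERDICT (by name: the statement is the Claim_ definition above) =====
theorem dp_o_n_spec : Claim_equal_dp_o_n := by
  intro inp _hDom
  unfold Spec_dp_o_n
  exact main_eq inp
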